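-- pv_equiv track=rewrite | github.com/YarrikV/Scripting_Languages_Exercises | W5/sestina.py | endword
-- ===== SOURCE A (Python) =====
-- def valid_word(word):
--     """Word consists of [a-Z-]
--     First and last char are alpha chars.
--
--     >>> valid_word("test-")
--     False
--     >>> valid_word("alp-oma")
--     False
--     >>> valid_word("a#bc")
--     False
--     """
--     return all(c.isalpha() for c in word)
--
-- def endword(line):
--     """
--     >>> endword("Lo ferm voler qu'el cor m'intra")
--     'intra'
--     >>> endword("no'm pot ges becs escoissendre ni ongla")
--     'ongla'
--     >>> endword("de lauzengier qui pert per mal dir s'arma;")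
--     'arma'
--     """
--     tl = [c.isalpha() for c in line]
--     tl.reverse()
--     end = tl.index(True)
--
--     word = line[::-1][end:][::-1]
--     while not valid_word(word):
--         word = word[1:]
--         if len(word) == 1:
--             return word
--     return word
-- ===== SOURCE B (Python) =====
-- def endword(line):
--     """Single backward scan: skip trailing non-alphabetic characters,
--     then collect the final run of alphabetic characters. O(n)."""
--     i = len(line) - 1
--     while i >= 0 and not line[i].isalpha():
--         i -= 1
--     j = i
--     while j >= 0 and line[j].isalpha():
--         j -= 1
--     return line[j + 1:i + 1]
-- ===== Notes on version B (the rewrite author's own statement) =====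
-- stated objective: simpler
-- what changed: Replaced A's reversed-boolean-list index search plus a loop that re-validates the whole remaining word with all() after each front-drop by a single backward index scan that skips trailing non-alphabetic characters and collects the final alphabetic run.
-- crash fix: On lines with no alphabetic character A raises ValueError (list.index(True) on an all-False list); B returns the empty string ''. — e.g. on endword("1+2"): A raises ValueError, B returns ""
import Mathlib
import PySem

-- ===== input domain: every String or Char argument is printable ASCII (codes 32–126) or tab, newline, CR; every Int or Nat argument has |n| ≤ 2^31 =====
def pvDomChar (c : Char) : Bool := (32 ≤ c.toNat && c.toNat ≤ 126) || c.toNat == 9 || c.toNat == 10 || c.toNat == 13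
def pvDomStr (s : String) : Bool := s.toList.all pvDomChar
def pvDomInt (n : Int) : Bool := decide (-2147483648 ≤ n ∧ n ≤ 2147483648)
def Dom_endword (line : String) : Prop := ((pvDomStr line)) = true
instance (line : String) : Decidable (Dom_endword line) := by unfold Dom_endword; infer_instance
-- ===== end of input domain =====

-- B replaces A's reversed-index search + repeated whole-word all() revalidation by one
-- backward scan (skip trailing non-alpha, collect the final alpha run): simpler, one pass.


-- ===== PORT A =====
-- valid_word(word): all(c.isalpha() for c in word); strings carried as List Char
def valid_word (word : List Char) : Bool := word.all PySem.Chars.isalpha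

-- the while-loop of endword: drop the first char until valid_word holds
-- (the `[] => []` arm is unreachable: valid_word [] = true)
def endwordLoop : List Char → List Char
  | [] => []
  | c :: t =>
    if valid_word (c :: t) then c :: t
    else if t.length == 1 then t else endwordLoop t

def endword (line : String) : String :=
  -- tl = [c.isalpha() for c in line]; tl.reverse(); end = tl.index(True) (none = ValueError, excluded by Pre_)
  match PySem.List.index? ((line.toList.map PySem.Chars.isalpha).reverse) true with
  | none => ""
  | some e =>
      -- word = line[::-1][end:][::-1]: slices with step -1 and a Nat lower bound, exact as reverse/drop
      String.ofList (endwordLoop ((line.toList.reverse.drop e).reverse))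

-- ===== PORT B =====
-- first backward scan of Source B (while i >= 0 and not line[i].isalpha(): i -= 1),
-- expressed on the reversed char list: skip the non-alpha prefix
def skipNonAlpha : List Char → List Char
  | [] => []
  | c :: t => if PySem.Chars.isalpha c then c :: t else skipNonAlpha t

-- second backward scan (while j >= 0 and line[j].isalpha(): j -= 1): collect the alpha run
def takeAlpha : List Char → List Char
  | [] => []
  | c :: t => if PySem.Chars.isalpha c then c :: takeAlpha t else []

def endword_alt (line : String) : String :=
  String.ofList ((takeAlpha (skipNonAlpha line.toList.reverse)).reverse)

-- ===== PRECONDITION & SPEC =====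
-- A raises ValueError (tl.index(True) on an all-False list) iff line has no alphabetic char.
def Pre_endword (line : String) : Prop := line.toList.any PySem.Chars.isalpha = true
instance (line : String) : Decidable (Pre_endword line) := by unfold Pre_endword; infer_instance
def pvWitness_endword : String := "hi there!!"

-- On lines with no alphabetic character A raises ValueError; B returns the empty string ''.
def Raises_endword (line : String) : Prop := line.toList.any PySem.Chars.isalpha = false
instance (line : String) : Decidable (Raises_endword line) := by unfold Raises_endword; infer_instance
def pvRaiseWitness_endword : String := "1+2"
def pvRaiseWitnessOut_endword : String := ""

def Spec_endword (line : String) (out : String) : Prop := out = endword_alt line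
instance (line : String) (out : String) : Decidable (Spec_endword line out) := by unfold Spec_endword; infer_instance

-- ===== CLAIM (what is proved, stated in full; the proofs are below) =====
def Claim_equal_endword : Prop := ∀ (line : String), Dom_endword line → Pre_endword line → Spec_endword line (endword line)
def Claim_raises_endword : Prop := (∀ (line : String), Dom_endword line → Raises_endword line → ¬ Pre_endword line) ∧ (Dom_endword (pvRaiseWitness_endword) ∧ Raises_endword (pvRaiseWitness_endword) ∧ endword_alt (pvRaiseWitness_endword) = pvRaiseWitnessOut_endword)

-- ===== LEMMAS AND PROOFS =====

lemma takeAlpha_all (l : List Char) (h : l.all PySem.Chars.isalpha = true) :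
    takeAlpha l = l := by
  induction l with
  | nil => rfl
  | cons c t ih =>
    simp only [List.all_cons, Bool.and_eq_true] at h
    simp [takeAlpha, h.1, ih h.2]

lemma takeAlpha_append (xs ys : List Char) :
    takeAlpha (xs ++ ys) =
      if xs.all PySem.Chars.isalpha then xs ++ takeAlpha ys else takeAlpha xs := by
  induction xs with
  | nil => simp
  | cons c t ih =>
    by_cases hc : PySem.Chars.isalpha c = true
    · simp [takeAlpha, hc, ih]
      split_ifs <;> simp
    · simp [takeAlpha, hc]

lemma loop_eq : ∀ (w : List Char) (c : Char), w.getLast? = some c →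
    PySem.Chars.isalpha c = true → endwordLoop w = (takeAlpha w.reverse).reverse := by
  intro w
  induction w with
  | nil => intro c hc; simp at hc
  | cons a t ih =>
    intro c hc hal
    by_cases hv : valid_word (a :: t) = true
    · -- all alphabetic: takeAlpha keeps everything
      have hv'' : ((a :: t).reverse).all PySem.Chars.isalpha = true := by
        rw [List.all_reverse]; exact hv
      rw [takeAlpha_all _ hv'']
      cases t <;> simp [endwordLoop, hv]
    · have hne : t ≠ [] := by
        rintro rfl
        have : a = c := by simpa using hc
        subst this
        exact hv (by simp [valid_word, hal])
      have hlast : t.getLast? = some c := by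
        cases t with
        | nil => exact absurd rfl hne
        | cons b t' => simpa [List.getLast?_cons_cons] using hc
      -- takeAlpha over the reverse ignores the dropped front char a
      have hstep : takeAlpha ((a :: t).reverse) = takeAlpha t.reverse := by
        have : (a :: t).reverse = t.reverse ++ [a] := by simp
        rw [this, takeAlpha_append]
        by_cases hta : t.reverse.all PySem.Chars.isalpha = true
        · have hta' : t.all PySem.Chars.isalpha = true := by rwa [List.all_reverse] at hta
          have ha : PySem.Chars.isalpha a = false := by
            cases hba : PySem.Chars.isalpha a with
            | false => rfl
            | true => exact absurd (by simp [valid_word, hba, hta']) hv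
          simp [hta, takeAlpha, ha, takeAlpha_all _ hta]
        · simp [hta]
      rw [hstep]
      rcases t with _ | ⟨b, t'⟩
      · exact absurd rfl hne
      rcases t' with _ | ⟨d, t''⟩
      · -- len(word) == 1 early return; the single char is the (alphabetic) last char
        have : b = c := by simpa [List.getLast?] using hlast
        subst this
        simp [endwordLoop, hv, takeAlpha, hal]
      · simp only [endwordLoop, hv]
        rw [if_neg (by simp)]
        exact ih c hlast hal

lemma skip_head : ∀ (l : List Char) (c : Char) (t : List Char),
    skipNonAlpha l = c :: t → PySem.Chars.isalpha c = true := by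
  intro l
  induction l with
  | nil => intro c t h; simp [skipNonAlpha] at h
  | cons a r ih =>
    intro c t h
    by_cases ha : PySem.Chars.isalpha a = true
    · simp [skipNonAlpha, ha] at h
      rw [← h.1]; exact ha
    · simp [skipNonAlpha, ha] at h
      exact ih c t h

lemma index_skip : ∀ (l : List Char) (e : Nat),
    PySem.List.index? (l.map PySem.Chars.isalpha) true = some e →
    l.drop e = skipNonAlpha l := by
  intro l
  induction l with
  | nil => intro e h; simp [PySem.List.index?] at h
  | cons a t ih =>
    intro e h
    by_cases ha : PySem.Chars.isalpha a = true
    · rw [List.map_cons, ha, PySem.List.index?_cons_self] at h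
      cases h
      simp [skipNonAlpha, ha]
    · have hne : PySem.Chars.isalpha a ≠ true := ha
      rw [List.map_cons, PySem.List.index?_cons_of_ne _ hne] at h
      rcases Option.map_eq_some_iff.mp h with ⟨e', he', rfl⟩
      simp only [List.drop_succ_cons, skipNonAlpha]
      rw [if_neg (by simp [ha])]
      exact ih e' he'

lemma skip_ne_nil (l : List Char) (h : l.any PySem.Chars.isalpha = true) :
    skipNonAlpha l ≠ [] := by
  induction l with
  | nil => simp at h
  | cons a t ih =>
    by_cases ha : PySem.Chars.isalpha a = true
    · simp [skipNonAlpha, ha]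
    · simp only [List.any_cons, Bool.or_eq_true] at h
      rcases h with h | h
      · exact absurd h ha
      · simpa [skipNonAlpha, ha] using ih h

-- ===== VERDICT (by name: the statement is the Claim_ definition above) =====
theorem endword_spec : Claim_equal_endword := by
  intro line _ hpre
  unfold Pre_endword at hpre
  unfold Spec_endword endword endword_alt
  have hanyrev : line.toList.reverse.any PySem.Chars.isalpha = true := by
    rw [List.any_reverse]; exact hpre
  have hmem : true ∈ (line.toList.map PySem.Chars.isalpha).reverse := by
    rw [List.mem_reverse]
    rcases List.any_eq_true.mp hpre with ⟨c, hc, hcal⟩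
    exact List.mem_map.mpr ⟨c, hc, hcal⟩
  obtain ⟨e, he⟩ := Option.isSome_iff_exists.mp
    ((PySem.List.index?_isSome_iff _ _).mpr hmem)
  simp only [he]
  have he' : PySem.List.index? ((line.toList.reverse).map PySem.Chars.isalpha) true = some e := by
    rw [List.map_reverse]; exact he
  have hdrop := index_skip _ e he'
  rcases hh : skipNonAlpha line.toList.reverse with _ | ⟨c, t⟩
  · exact absurd hh (skip_ne_nil _ hanyrev)
  · have hal : PySem.Chars.isalpha c = true := skip_head _ c t hh
    rw [hdrop, hh, loop_eq ((c :: t).reverse) c (by simp) hal, List.reverse_reverse]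

@[simp] theorem endword_raises : Claim_raises_endword := by
  unfold Claim_raises_endword
  constructor
  · intro line _ hr hp
    unfold Raises_endword at hr
    unfold Pre_endword at hp
    rw [hp] at hr
    exact Bool.true_eq_false.mp hr
  · exact ⟨by decide, by decide, by decide⟩
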